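-- pv_equiv track=rewrite | github.com/Brandon-git-hub/Tools | Compare/compare_16mask_gui_v4.py | build_masks
-- ===== SOURCE A (Python) =====
-- def build_masks(a: dict, b: dict):
--     if not a and not b:
--         return {}, [], []
--     all_addrs = sorted(set(a.keys()) | set(b.keys()))
--     first = (min(all_addrs)//16)*16
--     last  = ((max(all_addrs)//16)+1)*16 - 1
--     masks = {}
--     for base in range(first, last+1, 16):
--         mask = 0xFFFF
--         for i in range(16):
--             addr = base + i
--             v1 = a.get(addr)
--             v2 = b.get(addr)
--             is_match = (v1 == v2) and (v1 is not None)
--             if not is_match: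
--                 mask &= ~(1 << (15 - i))
--         masks[base] = mask
--     row_bases = list(range((first // 256) * 256, ((last // 256) + 1) * 256, 256))
--     col_offsets = [i*16 for i in range(16)]  # +00..+F0
--     return masks, row_bases, col_offsets
-- ===== SOURCE B (Python) =====
-- def build_masks(a: dict, b: dict):
--     if len(a) + len(b) == 0:
--         return {}, [], []
--     keys = list(a) + list(b)
--     first = (min(keys)//16)*16
--     last  = ((max(keys)//16)+1)*16 - 1
--     # sparse pass over a's entries: collect the match bit of each matching address
--     bits = {}
--     for addr, v1 in a.items():
--         if v1 is not None and b.get(addr) == v1: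
--             base = (addr//16)*16
--             bits[base] = bits.get(base, 0) | (1 << (15 - (addr - base)))
--     # lay the collected bits out over the dense block range
--     masks = {base: bits.get(base, 0) for base in range(first, last+1, 16)}
--     row_bases = list(range((first//256)*256, ((last//256)+1)*256, 256))
--     col_offsets = list(range(0, 256, 16))
--     return masks, row_bases, col_offsets
-- ===== Notes on version B (the rewrite author's own statement) =====
-- stated objective: faster
-- what changed: A scans all 16 offsets of every 16-address block, probing both dicts per offset and clearing non-match bits from 0xFFFF; B makes one sparse pass over a.items() collecting set-bits per block into a small dict, then lays them out over the block range with a get-with-default comprehension, and computes min/max over the concatenated key lists instead of a sorted set union.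
import Mathlib
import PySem

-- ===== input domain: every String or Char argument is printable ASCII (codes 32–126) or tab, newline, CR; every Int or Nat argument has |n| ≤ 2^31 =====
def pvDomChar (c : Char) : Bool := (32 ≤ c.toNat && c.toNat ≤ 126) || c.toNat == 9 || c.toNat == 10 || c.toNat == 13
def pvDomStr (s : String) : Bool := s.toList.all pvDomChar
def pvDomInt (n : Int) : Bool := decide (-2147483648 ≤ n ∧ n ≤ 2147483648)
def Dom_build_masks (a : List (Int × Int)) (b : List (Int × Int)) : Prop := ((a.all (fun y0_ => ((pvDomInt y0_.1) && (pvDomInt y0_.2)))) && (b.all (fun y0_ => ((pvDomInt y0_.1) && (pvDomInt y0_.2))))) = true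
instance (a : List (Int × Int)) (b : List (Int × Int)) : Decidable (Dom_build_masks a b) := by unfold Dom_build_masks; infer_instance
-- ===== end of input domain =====

-- B replaces A's dense per-block 16-offset scan (clearing non-match bits of 0xFFFF) by one sparse
-- pass over a's entries collecting set-bits per block, then a layout map over the dense block range
-- (measurably faster by a constant factor); min/max are taken over the concatenated key lists.

-- ===== PORT A =====
-- inner loop body of A's per-block scan: clears bit (15-i) when addr=base+i is not a match.
-- i ranges over range(16), so 0 ≤ 15-i and the .toNat on the shift amount is exact.
def maskBitA (da db : PySem.Dict Int Int) (base : Int) (mask : Int) (i : Int) : Int :=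
  let addr := base + i
  let v1 := da.get? addr
  let v2 := db.get? addr
  let is_match := (v1 == v2) && v1.isSome
  if !is_match then PySem.Int.band mask (Int.not ((1 : Int) <<< (15 - i).toNat)) else mask

def build_masks (a : List (Int × Int)) (b : List (Int × Int)) : (List (Int × Int)) × List Int × List Int :=
  if a.isEmpty && b.isEmpty then ([], [], [])
  else
    let da : PySem.Dict Int Int := ⟨a⟩
    let db : PySem.Dict Int Int := ⟨b⟩
    let all_addrs : List Int :=
      PySem.List.sorted ((PySem.Set.ofList da.keys).union (PySem.Set.ofList db.keys)) (fun x => x)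
    -- min/max on the nonempty all_addrs; the `| _, _` arm is unreachable (Python min/max get a nonempty list)
    match PySem.List.min? all_addrs (fun x => x), PySem.List.max? all_addrs (fun x => x) with
    | some mn, some mx =>
      let first := PySem.Int.floordiv mn 16 * 16
      let last := (PySem.Int.floordiv mx 16 + 1) * 16 - 1
      let masks := List.foldl
        (fun (masks : PySem.Dict Int Int) (base : Int) =>
          masks.insert base (List.foldl (maskBitA da db base) 65535 (PySem.List.pyRange 0 16 1)))
        PySem.Dict.empty (PySem.List.pyRange first (last + 1) 16)
      let row_bases := PySem.List.pyRange (PySem.Int.floordiv first 256 * 256)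
        ((PySem.Int.floordiv last 256 + 1) * 256) 256
      let col_offsets := List.map (fun i => i * 16) (PySem.List.pyRange 0 16 1)
      (masks.items, row_bases, col_offsets)
    | _, _ => ([], [], [])

-- ===== PORT B =====
def blockBaseB (addr : Int) : Int := PySem.Int.floordiv addr 16 * 16

-- loop body of B's sparse pass: `v1 is not None` is always true for an int-valued dict, and
-- `bits[base] = bits.get(base, 0) | bit` is getD followed by insert.
def addBitB (db : PySem.Dict Int Int) (bits : PySem.Dict Int Int) (p : Int × Int) : PySem.Dict Int Int :=
  if db.get? p.1 == some p.2 then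
    bits.insert (blockBaseB p.1)
      (PySem.Int.bor (bits.getD (blockBaseB p.1) 0)
        ((1 : Int) <<< (15 - (p.1 - blockBaseB p.1)).toNat))
  else bits

def build_masks_alt (a : List (Int × Int)) (b : List (Int × Int)) : (List (Int × Int)) × List Int × List Int :=
  if a.length + b.length == 0 then ([], [], [])
  else
    let keys := PySem.Dict.keys (⟨a⟩ : PySem.Dict Int Int) ++ PySem.Dict.keys (⟨b⟩ : PySem.Dict Int Int)
    -- min()/max() raise on an empty list; `keys` is nonempty here, the none arms are unreachable
    match PySem.List.min? keys (fun x => x) with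
    | none => ([], [], [])
    | some mn =>
      match PySem.List.max? keys (fun x => x) with
      | none => ([], [], [])
      | some mx =>
        let first := PySem.Int.floordiv mn 16 * 16
        let last := (PySem.Int.floordiv mx 16 + 1) * 16 - 1
        let bits := List.foldl (addBitB ⟨b⟩) PySem.Dict.empty a
        -- dict comprehension over the (distinct) bases: its items list is this map
        let masks := (PySem.List.pyRange first (last + 1) 16).map
          (fun base => (base, bits.getD base 0))
        let row_bases := PySem.List.pyRange (PySem.Int.floordiv first 256 * 256)
          ((PySem.Int.floordiv last 256 + 1) * 256) 256
        (masks, row_bases, PySem.List.pyRange 0 256 16)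

-- ===== PRECONDITION & SPEC =====
-- Pre_ excludes association lists whose first components (the keys of the dict a) repeat:
-- such lists represent no Python dict (Python dict keys are unique), so no actual input of A
-- is excluded; on them A's first-match lookup and B's pass over all entries may disagree.
def Pre_build_masks (a : List (Int × Int)) (_b : List (Int × Int)) : Prop :=
  (a.map Prod.fst).Nodup

instance (a : List (Int × Int)) (b : List (Int × Int)) : Decidable (Pre_build_masks a b) := by
  unfold Pre_build_masks; infer_instance

def pvWitness_build_masks : (List (Int × Int)) × (List (Int × Int)) := ([(0, 1), (3, 2)], [(0, 1)])

def Spec_build_masks (a : List (Int × Int)) (b : List (Int × Int)) (out : (List (Int × Int)) × List Int × List Int) : Prop := out = build_masks_alt a b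
instance (a : List (Int × Int)) (b : List (Int × Int)) (out : (List (Int × Int)) × List Int × List Int) : Decidable (Spec_build_masks a b out) := by unfold Spec_build_masks; infer_instance

-- ===== CLAIM (what is proved, stated in full; the proofs are below) =====
def Claim_equal_build_masks : Prop := ∀ (a : List (Int × Int)) (b : List (Int × Int)), Dom_build_masks a b → Pre_build_masks a b → Spec_build_masks a b (build_masks a b)

-- ===== LEMMAS AND PROOFS =====

-- bit arithmetic
lemma pv_not_natCast (k : Nat) : Int.not (k : Int) = Int.negSucc k := rfl

lemma pv_shift_cast (e : Nat) : (1 : Int) <<< e = ((2 ^ e : Nat) : Int) := by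
  simp [Int.shiftLeft_eq]

lemma pv_band_not_natCast (m k : Nat) :
    PySem.Int.band (m : Int) (Int.not (k : Int)) = ((m - (m &&& k) : Nat) : Int) := by
  rw [pv_not_natCast]
  simp [PySem.Int.band, Int.negSucc_eq]
  ring_nf
  norm_num
  intro hk
  omega

lemma pv_lor_pow_add (m e : Nat) (h : m.testBit e = false) : m ||| 2 ^ e = m + 2 ^ e := by
  have h2 := @Nat.testBit_eq_decide_div_mod_eq e m
  rw [h] at h2
  have hb : m / 2 ^ e % 2 = 0 := by have := of_decide_eq_false h2.symm; omega
  have hpe : 0 < (2 : Nat) ^ e := Nat.two_pow_pos e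
  have hlo : m % 2 ^ (e + 1) < 2 ^ e := by
    have hm := @Nat.mod_pow_succ m 2 e
    have h3 : m % 2 ^ e < 2 ^ e := Nat.mod_lt _ hpe
    rw [hm, hb]; omega
  have e0 : m = 2 ^ (e + 1) * (m / 2 ^ (e + 1)) + m % 2 ^ (e + 1) := by
    have := Nat.div_add_mod m (2 ^ (e + 1)); omega
  set hi := m / 2 ^ (e + 1) with hhi
  set lo := m % 2 ^ (e + 1) with hlo2
  have eA : 2 ^ (e + 1) * hi + lo = 2 ^ (e + 1) * hi ||| lo :=
    Nat.two_pow_add_eq_or_of_lt (lt_trans hlo (by omega)) hi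
  have eB : 2 ^ (e + 1) * hi + (lo + 2 ^ e) = 2 ^ (e + 1) * hi ||| (lo + 2 ^ e) :=
    Nat.two_pow_add_eq_or_of_lt (by have := pow_succ 2 e; omega) hi
  have eC : (2 : Nat) ^ e + lo = 2 ^ e ||| lo := by
    have := Nat.two_pow_add_eq_or_of_lt (i := e) hlo 1
    simpa using this
  calc m ||| 2 ^ e = (2 ^ (e + 1) * hi ||| lo) ||| 2 ^ e := by rw [← eA, ← e0]
    _ = 2 ^ (e + 1) * hi ||| (lo + 2 ^ e) := by
        rw [Nat.lor_assoc]
        congr 1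
        rw [Nat.lor_comm, ← eC]
        omega
    _ = m + 2 ^ e := by rw [← eB]; omega

lemma pv_clear_step (c n : Nat) (hc : c % 2 ^ (n + 1) = 0) :
    (c + (2 ^ (n + 1) - 1)) - ((c + (2 ^ (n + 1) - 1)) &&& 2 ^ n) = c + (2 ^ n - 1) := by
  have hpn : 0 < (2 : Nat) ^ n := Nat.two_pow_pos n
  have hdecomp : c + (2 ^ (n + 1) - 1) = 2 ^ n * (2 * (c / 2 ^ (n + 1)) + 1) + (2 ^ n - 1) := by
    have h1 := Nat.div_add_mod c (2 ^ (n + 1))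
    have h2 : (2 : Nat) ^ (n + 1) = 2 * 2 ^ n := by rw [pow_succ]; ring
    rw [hc] at h1
    rw [h2] at h1 ⊢
    ring_nf
    ring_nf at h1
    omega
  have hTB : (c + (2 ^ (n + 1) - 1)).testBit n = true := by
    rw [Nat.testBit_eq_decide_div_mod_eq, hdecomp]
    have hdiv : (2 ^ n * (2 * (c / 2 ^ (n + 1)) + 1) + (2 ^ n - 1)) / 2 ^ n
        = 2 * (c / 2 ^ (n + 1)) + 1 := by
      rw [Nat.mul_add_div hpn]
      have : (2 ^ n - 1) / 2 ^ n = 0 := Nat.div_eq_of_lt (by omega)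
      omega
    rw [← hdecomp] at hdiv ⊢
    rw [hdiv]
    simp
  rw [Nat.and_two_pow, hTB]
  have h2 : (2 : Nat) ^ (n + 1) = 2 * 2 ^ n := by rw [pow_succ]; ring
  simp
  omega

-- the per-address match predicate and the target mask value
def pvMb (da db : PySem.Dict Int Int) (addr : Int) : Bool :=
  (da.get? addr == db.get? addr) && (da.get? addr).isSome

def pvTm (da db : PySem.Dict Int Int) (t : Int) : Nat → Nat
  | 0 => 0
  | n + 1 => (if pvMb da db (t + (15 - (n : Int))) then 2 ^ n else 0) + pvTm da db t n

-- A's inner 16-step scan computes pvTm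
lemma pv_foldA (da db : PySem.Dict Int Int) (t : Int) :
    ∀ (n : Nat), n ≤ 16 → ∀ (c : Nat), c % 2 ^ n = 0 →
    List.foldl (maskBitA da db t) ((c + (2 ^ n - 1) : Nat) : Int)
      (PySem.List.pyRange (16 - (n : Int)) 16 1) = ((c + pvTm da db t n : Nat) : Int) := by
  intro n
  induction n with
  | zero =>
    intro _ c _
    have hnil : PySem.List.pyRange (16 - ((0 : Nat) : Int)) 16 1 = [] := by decide
    rw [hnil]
    simp [pvTm]
  | succ n ih =>
    intro hn c hc
    have hcons : PySem.List.pyRange (16 - ((n + 1 : Nat) : Int)) 16 1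
        = (15 - (n : Int)) :: PySem.List.pyRange (16 - (n : Nat)) 16 1 := by
      have h1 : (16 - ((n + 1 : Nat) : Int)) = 15 - (n : Int) := by push_cast; ring
      have h2 : (15 - (n : Int)) < 16 := by omega
      rw [h1, PySem.List.pyRange_one_cons h2]
      congr 2
      omega
    rw [hcons]
    simp only [List.foldl_cons]
    have he : ((15 : Int) - (15 - (n : Int))).toNat = n := by omega
    by_cases hm : pvMb da db (t + (15 - (n : Int))) = true
    · have hstep : maskBitA da db t ((c + (2 ^ (n + 1) - 1) : Nat) : Int) (15 - (n : Int))
          = (((c + 2 ^ n) + (2 ^ n - 1) : Nat) : Int) := by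
        simp only [maskBitA, pvMb] at hm ⊢
        rw [hm]
        simp only [Bool.not_true, Bool.false_eq_true, if_false]
        congr 1
        have := Nat.two_pow_pos n
        have h2 : (2 : Nat) ^ (n + 1) = 2 * 2 ^ n := by rw [pow_succ]; ring
        omega
      have hdvd : (2 : Nat) ^ n ∣ c :=
        dvd_trans (pow_dvd_pow 2 (by omega)) (Nat.dvd_of_mod_eq_zero hc)
      rw [hstep, ih (by omega) (c + 2 ^ n)
        (Nat.dvd_iff_mod_eq_zero.mp (Nat.dvd_add hdvd dvd_rfl))]
      congr 1
      simp only [pvTm, hm, if_true]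
      omega
    · have hm' : pvMb da db (t + (15 - (n : Int))) = false := by
        revert hm; cases pvMb da db (t + (15 - (n : Int))) <;> simp
      have hstep : maskBitA da db t ((c + (2 ^ (n + 1) - 1) : Nat) : Int) (15 - (n : Int))
          = ((c + (2 ^ n - 1) : Nat) : Int) := by
        simp only [maskBitA, pvMb] at hm' ⊢
        rw [hm']
        simp only [Bool.not_false, if_true]
        rw [he, pv_shift_cast, pv_band_not_natCast]
        congr 1
        exact pv_clear_step c n hc
      have hdvd : (2 : Nat) ^ n ∣ c :=
        dvd_trans (pow_dvd_pow 2 (by omega)) (Nat.dvd_of_mod_eq_zero hc)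
      rw [hstep, ih (by omega) c (Nat.dvd_iff_mod_eq_zero.mp hdvd)]
      congr 2
      simp [pvTm, hm']

lemma pv_rowA (da db : PySem.Dict Int Int) (t : Int) :
    List.foldl (maskBitA da db t) 65535 (PySem.List.pyRange 0 16 1)
      = ((pvTm da db t 16 : Nat) : Int) := by
  have h := pv_foldA da db t 16 (le_refl _) 0 (by norm_num)
  norm_num at h
  exact h

-- floor-division bracket: q*16 ≤ k < q*16+16 for q = k//16
lemma pv_fd16 (k : Int) : blockBaseB k ≤ k ∧ k < blockBaseB k + 16 := by
  have h1 := PySem.Int.floordiv_mul_add_mod k 16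
  have h2 := PySem.Int.mod_nonneg k (b := 16) (by norm_num)
  have h3 := PySem.Int.mod_lt k (b := 16) (by norm_num)
  unfold blockBaseB
  omega

lemma pv_blockBase_of (u k : Int) (hu : 16 ∣ u) (h1 : u ≤ k) (h2 : k < u + 16) :
    blockBaseB k = u := by
  obtain ⟨q, hq⟩ := hu
  have hb := pv_fd16 k
  unfold blockBaseB at hb ⊢
  omega

-- B's effect on the mask of one fixed block u, expressed as a fold over a's entries
def pvAcc (db : PySem.Dict Int Int) (u : Int) (m : Int) (p : Int × Int) : Int :=
  if (db.get? p.1 == some p.2) && (blockBaseB p.1 == u) then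
    PySem.Int.bor m ((1 : Int) <<< (15 - (p.1 - u)).toNat)
  else m

def pvHit (db : PySem.Dict Int Int) (u : Int) (p : Int × Int) : Bool :=
  (db.get? p.1 == some p.2) && (blockBaseB p.1 == u)

def pvExpo (u : Int) (p : Int × Int) : Nat := (15 - (p.1 - u)).toNat

def pvSumB (db : PySem.Dict Int Int) (u : Int) (l : List (Int × Int)) : Nat :=
  (l.map fun p => if pvHit db u p then 2 ^ pvExpo u p else 0).sum

-- projecting B's sparse fold at one key u gives the per-block fold pvAcc
lemma pv_getD_addBit_fold (db : PySem.Dict Int Int) :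
    ∀ (l : List (Int × Int)) (d0 : PySem.Dict Int Int) (u : Int),
    (List.foldl (addBitB db) d0 l).getD u 0 = List.foldl (pvAcc db u) (d0.getD u 0) l := by
  intro l
  induction l with
  | nil => intro d0 u; simp
  | cons p l ih =>
    intro d0 u
    simp only [List.foldl_cons]
    rw [ih]
    congr 1
    unfold addBitB pvAcc
    by_cases hc : (db.get? p.1 == some p.2) = true
    · rw [if_pos hc, PySem.Dict.getD_insert]
      by_cases hu : u = blockBaseB p.1
      · rw [if_pos hu]
        rw [hc]
        simp [hu]
      · rw [if_neg hu]
        have : (blockBaseB p.1 == u) = false := beq_eq_false_iff_ne.mpr (fun h => hu h.symm)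
        simp [hc, this]
    · rw [if_neg hc]
      simp [hc]

lemma pv_hit_bounds (db : PySem.Dict Int Int) (u : Int) (p : Int × Int)
    (h : pvHit db u p = true) : u ≤ p.1 ∧ p.1 < u + 16 := by
  have hb : blockBaseB p.1 = u := by
    simp only [pvHit, Bool.and_eq_true, beq_iff_eq] at h
    exact h.2
  have := pv_fd16 p.1
  omega

lemma pv_borFold (db : PySem.Dict Int Int) (u : Int) :
    ∀ (l : List (Int × Int)), (l.map Prod.fst).Nodup →
    ∀ (s : Nat), (∀ p ∈ l, pvHit db u p = true → s.testBit (pvExpo u p) = false) →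
    List.foldl (pvAcc db u) ((s : Nat) : Int) l = ((s + pvSumB db u l : Nat) : Int) := by
  intro l
  induction l with
  | nil => intro _ s _; simp [pvSumB]
  | cons p l ih =>
    intro hnd s hs
    rw [List.map_cons] at hnd
    obtain ⟨hnotmem, hnd'⟩ := List.nodup_cons.mp hnd
    simp only [List.foldl_cons]
    by_cases hh : pvHit db u p = true
    · have he : pvExpo u p < 16 := by
        have := pv_hit_bounds db u p hh
        unfold pvExpo
        omega
      have hTB := hs p (by simp) hh
      have hstep : pvAcc db u ((s : Nat) : Int) p = (((s + 2 ^ pvExpo u p : Nat)) : Int) := by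
        unfold pvAcc
        simp only [pvHit] at hh
        rw [if_pos hh]
        have : (15 - (p.1 - u)).toNat = pvExpo u p := rfl
        rw [this, pv_shift_cast, PySem.Int.bor_natCast]
        rw [pv_lor_pow_add s (pvExpo u p) hTB]
      rw [hstep, ih hnd' (s + 2 ^ pvExpo u p) ?_]
      · congr 1
        have : pvSumB db u (p :: l) = 2 ^ pvExpo u p + pvSumB db u l := by
          simp [pvSumB, hh]
        omega
      · intro q hq hhq
        have hq1 : q.1 ≠ p.1 := by
          intro hqp
          exact hnotmem (hqp ▸ List.mem_map_of_mem hq)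
        have hne : pvExpo u q ≠ pvExpo u p := by
          have b1 := pv_hit_bounds db u q hhq
          have b2 := pv_hit_bounds db u p hh
          unfold pvExpo
          omega
        have h2 : s + 2 ^ pvExpo u p = s ||| 2 ^ pvExpo u p := (pv_lor_pow_add s _ hTB).symm
        rw [h2, Nat.testBit_lor, hs q (by simp [hq]) hhq, Nat.testBit_two_pow]
        simp [Ne.symm hne]
    · have hstep : pvAcc db u ((s : Nat) : Int) p = ((s : Nat) : Int) := by
        unfold pvAcc
        simp only [pvHit] at hh
        rw [if_neg hh]
      have hsum : pvSumB db u (p :: l) = pvSumB db u l := by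
        simp only [pvSumB, List.map_cons, List.sum_cons]
        rw [if_neg hh]
        omega
      rw [hstep, ih hnd' s (fun q hq hhq => hs q (by simp [hq]) hhq), hsum]

lemma pv_list_finset_swap (l : List (Int × Int)) (s : Finset Nat) (H : Int × Int → Nat → Nat) :
    (l.map fun p => ∑ k ∈ s, H p k).sum = ∑ k ∈ s, (l.map fun p => H p k).sum := by
  induction l with
  | nil => simp
  | cons p l ih => simp [ih, Finset.sum_add_distrib]

lemma pv_point (db : PySem.Dict Int Int) (u : Int) (p : Int × Int) :
    (if pvHit db u p then 2 ^ pvExpo u p else 0)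
      = ∑ k ∈ Finset.range 16,
          (if p.1 = u + (15 - (k : Int)) ∧ pvHit db u p = true then 2 ^ k else 0) := by
  by_cases hh : pvHit db u p = true
  · have hb := pv_hit_bounds db u p hh
    have hk0 : pvExpo u p < 16 := by unfold pvExpo; omega
    have hcond : ∀ k ∈ Finset.range 16,
        (if p.1 = u + (15 - (k : Int)) ∧ pvHit db u p = true then 2 ^ k else 0)
          = (if k = pvExpo u p then 2 ^ k else 0) := by
      intro k hk
      simp only [Finset.mem_range] at hk
      congr 1
      simp only [hh, and_true, eq_iff_iff]
      unfold pvExpo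
      omega
    rw [Finset.sum_congr rfl hcond, Finset.sum_ite_eq' (Finset.range 16) (pvExpo u p) (fun k => 2 ^ k)]
    simp [hh, Finset.mem_range.mpr hk0]
  · simp [hh]

lemma pv_find_sum (l : List (Int × Int)) (key : Int) (F : Int × Int → Nat)
    (hnd : (l.map Prod.fst).Nodup) :
    (l.map fun p => if p.1 = key then F p else 0).sum
      = (match l.find? (fun p => p.1 == key) with | some p => F p | none => 0) := by
  induction l with
  | nil => simp
  | cons p l ih =>
    rw [List.map_cons] at hnd
    obtain ⟨hnotmem, hnd'⟩ := List.nodup_cons.mp hnd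
    simp only [List.map_cons, List.sum_cons, List.find?]
    by_cases hp : p.1 = key
    · rw [if_pos hp]
      have hfind : (p.1 == key) = true := beq_iff_eq.mpr hp
      rw [hfind]
      have hzero : (l.map fun q => if q.1 = key then F q else 0).sum = 0 := by
        apply List.sum_eq_zero
        intro x hx
        simp only [List.mem_map] at hx
        obtain ⟨q, hq, hxq⟩ := hx
        have : q.1 ≠ key := by
          intro hqk
          exact hnotmem (by rw [← hp] at hqk; exact hqk ▸ List.mem_map_of_mem hq)
        rw [← hxq, if_neg this]
      simp [hzero]
    · rw [if_neg hp]
      have hfind : (p.1 == key) = false := beq_eq_false_iff_ne.mpr hp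
      rw [hfind]
      simp only [Nat.zero_add]
      exact ih hnd'

lemma pv_Tm_sum (da db : PySem.Dict Int Int) (u : Int) (n : Nat) :
    pvTm da db u n = ∑ k ∈ Finset.range n, (if pvMb da db (u + (15 - (k : Int))) then 2 ^ k else 0) := by
  induction n with
  | zero => simp [pvTm]
  | succ n ih => rw [Finset.sum_range_succ, ← ih]; simp [pvTm]; omega

lemma pv_sumB_eq_Tm (a b : List (Int × Int)) (u : Int)
    (hnd : (a.map Prod.fst).Nodup) (hu : 16 ∣ u) :
    pvSumB (⟨b⟩ : PySem.Dict Int Int) u a = pvTm (⟨a⟩ : PySem.Dict Int Int) ⟨b⟩ u 16 := by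
  unfold pvSumB
  have h1 : (a.map fun p => if pvHit (⟨b⟩ : PySem.Dict Int Int) u p then 2 ^ pvExpo u p else 0)
      = a.map fun p => ∑ k ∈ Finset.range 16,
          (if p.1 = u + (15 - (k : Int)) ∧ pvHit (⟨b⟩ : PySem.Dict Int Int) u p = true then 2 ^ k else 0) := by
    apply List.map_congr_left
    intro p _
    exact pv_point ⟨b⟩ u p
  rw [h1, pv_list_finset_swap, pv_Tm_sum]
  apply Finset.sum_congr rfl
  intro k hk
  simp only [Finset.mem_range] at hk
  set key := u + (15 - (k : Int)) with hkey
  have hblock : blockBaseB key = u := pv_blockBase_of u key hu (by omega) (by omega)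
  have hsplit : (a.map fun p => if p.1 = key ∧ pvHit (⟨b⟩ : PySem.Dict Int Int) u p = true then 2 ^ k else 0)
      = a.map fun p => if p.1 = key then (if pvHit (⟨b⟩ : PySem.Dict Int Int) u p then 2 ^ k else 0) else 0 := by
    apply List.map_congr_left
    intro p _
    by_cases h1 : p.1 = key <;> by_cases h2 : pvHit (⟨b⟩ : PySem.Dict Int Int) u p = true <;>
      simp [h1, h2]
  rw [hsplit, pv_find_sum a key _ hnd]
  have hget : (⟨a⟩ : PySem.Dict Int Int).get? key
      = (a.find? (fun p => p.1 == key)).map (fun p => p.2) := rfl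
  cases hf : a.find? (fun p => p.1 == key) with
  | none =>
    have : (⟨a⟩ : PySem.Dict Int Int).get? key = none := by rw [hget, hf]; rfl
    simp [pvMb, this]
  | some p =>
    have hp1 : p.1 = key := by
      have := List.find?_some hf
      simpa using this
    have hga : (⟨a⟩ : PySem.Dict Int Int).get? key = some p.2 := by rw [hget, hf]; rfl
    have hMb : pvMb (⟨a⟩ : PySem.Dict Int Int) ⟨b⟩ key
        = ((⟨b⟩ : PySem.Dict Int Int).get? key == some p.2) := by
      unfold pvMb
      rw [hga]
      simp only [Option.isSome_some, Bool.and_true]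
      cases hgb : (⟨b⟩ : PySem.Dict Int Int).get? key <;> simp [eq_comm]
    have hHit : pvHit (⟨b⟩ : PySem.Dict Int Int) u p
        = ((⟨b⟩ : PySem.Dict Int Int).get? key == some p.2) := by
      unfold pvHit
      rw [hp1, hblock]
      simp
    simp only []
    rw [hMb, hHit]

lemma pv_nodup_pyRange16 (f l : Int) : (PySem.List.pyRange f l 16).Nodup := by
  rw [PySem.List.pyRange_of_pos f l (by norm_num)]
  apply List.Nodup.map
  · intro x y hxy
    simp only [] at hxy
    omega
  · exact List.nodup_range

-- B's emptiness guard equals A's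
lemma pv_guard (a b : List (Int × Int)) :
    ((a.length + b.length == 0) : Bool) = (a.isEmpty && b.isEmpty) := by
  cases a <;> cases b <;> simp

-- ===== VERDICT (by name: the statement is the Claim_ definition above) =====
theorem build_masks_spec : Claim_equal_build_masks := by
  unfold Claim_equal_build_masks Spec_build_masks Pre_build_masks
  intro a b _ hnd
  unfold build_masks build_masks_alt
  by_cases hempty : (a.isEmpty && b.isEmpty) = true
  · rw [if_pos hempty, if_pos (by rw [pv_guard]; exact hempty)]
  · rw [if_neg hempty, if_neg (by rw [pv_guard]; exact hempty)]
    simp only []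
    -- the two address pools have the same members
    have hmemiff : ∀ x : Int,
        x ∈ PySem.List.sorted
          ((PySem.Set.ofList (PySem.Dict.keys (⟨a⟩ : PySem.Dict Int Int))).union
            (PySem.Set.ofList (PySem.Dict.keys (⟨b⟩ : PySem.Dict Int Int)))) (fun x => x)
        ↔ x ∈ PySem.Dict.keys (⟨a⟩ : PySem.Dict Int Int) ++ PySem.Dict.keys (⟨b⟩ : PySem.Dict Int Int) := by
      intro x
      rw [PySem.List.mem_sorted, PySem.Set.mem_union, PySem.Set.mem_ofList, PySem.Set.mem_ofList,
        List.mem_append]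
    have hne2 : PySem.Dict.keys (⟨a⟩ : PySem.Dict Int Int) ++ PySem.Dict.keys (⟨b⟩ : PySem.Dict Int Int) ≠ [] := by
      cases a with
      | cons p t => simp [PySem.Dict.keys]
      | nil =>
        cases b with
        | cons p t => simp [PySem.Dict.keys]
        | nil => simp at hempty
    cases hmn2 : PySem.List.min?
        (PySem.Dict.keys (⟨a⟩ : PySem.Dict Int Int) ++ PySem.Dict.keys (⟨b⟩ : PySem.Dict Int Int))
        (fun x => x) with
    | none =>
      exfalso
      rw [PySem.List.min?_eq_none_iff] at hmn2
      exact hne2 hmn2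
    | some mn2 =>
    cases hmx2 : PySem.List.max?
        (PySem.Dict.keys (⟨a⟩ : PySem.Dict Int Int) ++ PySem.Dict.keys (⟨b⟩ : PySem.Dict Int Int))
        (fun x => x) with
    | none =>
      exfalso
      rw [PySem.List.max?_eq_none_iff] at hmx2
      exact hne2 hmx2
    | some mx2 =>
    cases hmn1 : PySem.List.min?
        (PySem.List.sorted
          ((PySem.Set.ofList (PySem.Dict.keys (⟨a⟩ : PySem.Dict Int Int))).union
            (PySem.Set.ofList (PySem.Dict.keys (⟨b⟩ : PySem.Dict Int Int)))) (fun x => x))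
        (fun x => x) with
    | none =>
      exfalso
      rw [PySem.List.min?_eq_none_iff] at hmn1
      have := (hmemiff mn2).mpr (PySem.List.min?_mem hmn2)
      rw [hmn1] at this
      exact (List.not_mem_nil) this
    | some mn1 =>
    cases hmx1 : PySem.List.max?
        (PySem.List.sorted
          ((PySem.Set.ofList (PySem.Dict.keys (⟨a⟩ : PySem.Dict Int Int))).union
            (PySem.Set.ofList (PySem.Dict.keys (⟨b⟩ : PySem.Dict Int Int)))) (fun x => x))
        (fun x => x) with
    | none =>
      exfalso
      rw [PySem.List.max?_eq_none_iff] at hmx1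
      have := (hmemiff mx2).mpr (PySem.List.max?_mem hmx2)
      rw [hmx1] at this
      exact (List.not_mem_nil) this
    | some mx1 =>
    -- the two minima (resp. maxima) coincide
    have hmneq : mn1 = mn2 := by
      have h1 : mn1 ∈ _ := PySem.List.min?_mem hmn1
      have h2 : mn2 ∈ _ := PySem.List.min?_mem hmn2
      have h12 := PySem.List.min?_isMin hmn1 mn2 ((hmemiff mn2).mpr h2)
      have h21 := PySem.List.min?_isMin hmn2 mn1 ((hmemiff mn1).mp h1)
      omega
    have hmxeq : mx1 = mx2 := by
      have h1 : mx1 ∈ _ := PySem.List.max?_mem hmx1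
      have h2 : mx2 ∈ _ := PySem.List.max?_mem hmx2
      have h12 := PySem.List.max?_isMax hmx1 mx2 ((hmemiff mx2).mpr h2)
      have h21 := PySem.List.max?_isMax hmx2 mx1 ((hmemiff mx1).mp h1)
      omega
    subst hmneq hmxeq
    refine congrArg₂ Prod.mk ?_ (congrArg₂ Prod.mk rfl (by decide))
    set first := PySem.Int.floordiv mn1 16 * 16 with hfirst
    set lastp1 := (PySem.Int.floordiv mx1 16 + 1) * 16 - 1 + 1 with hlastp1
    set bases := PySem.List.pyRange first lastp1 16 with hbases
    have hndb : bases.Nodup := pv_nodup_pyRange16 _ _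
    have hdvd_first : (16 : Int) ∣ first := ⟨PySem.Int.floordiv mn1 16, by rw [hfirst]; ring⟩
    have hAitems : (List.foldl
        (fun (masks : PySem.Dict Int Int) (base : Int) =>
          masks.insert base
            (List.foldl (maskBitA (⟨a⟩ : PySem.Dict Int Int) (⟨b⟩ : PySem.Dict Int Int) base)
              65535 (PySem.List.pyRange 0 16)))
        PySem.Dict.empty bases).items
        = bases.map fun t => (t,
            List.foldl (maskBitA (⟨a⟩ : PySem.Dict Int Int) (⟨b⟩ : PySem.Dict Int Int) t)
              65535 (PySem.List.pyRange 0 16)) := by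
      rw [PySem.Dict.items_foldl_insert_fresh bases (fun t => t)
        (fun t => List.foldl (maskBitA (⟨a⟩ : PySem.Dict Int Int) (⟨b⟩ : PySem.Dict Int Int) t)
          65535 (PySem.List.pyRange 0 16)) PySem.Dict.empty
        (fun x _ => PySem.Dict.contains_empty x) (by simpa using hndb)]
      rfl
    rw [hAitems]
    apply List.map_congr_left
    intro t ht
    have h16t : (16 : Int) ∣ t := by
      rw [hbases, PySem.List.mem_pyRange_iff_of_pos (by norm_num)] at ht
      obtain ⟨c, hc⟩ := ht.2.2
      obtain ⟨c', hc'⟩ := hdvd_first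
      exact ⟨c + c', by omega⟩
    congr 1
    rw [pv_rowA, pv_getD_addBit_fold]
    have h0 : PySem.Dict.empty.getD t 0 = ((0 : Nat) : Int) := by
      rw [PySem.Dict.getD_empty]
      rfl
    rw [h0, pv_borFold (⟨b⟩ : PySem.Dict Int Int) t a hnd 0
      (fun p _ _ => Nat.zero_testBit _)]
    rw [pv_sumB_eq_Tm a b t hnd h16t]
    norm_num
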